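-- pv_equiv track=rewrite | github.com/msjo91/BD_SNU | programming/QTR1/prime_Sieve_of_Eratosthenes.py | sift2
-- ===== SOURCE A (Python) =====
-- def sift2(li, k):
--     """
--     Filters out the multiples of the number k from list by modifying the list.
--     """
--     i = 0
--     while i < len(li):
--         if li[i] % k == 0:
--             li.remove(li[i])
--         else:
--             i += 1
--     return li
-- ===== SOURCE B (Python) =====
-- def sift2(li, k):
--     """Single-pass in-place compaction with a write pointer (O(n) instead of
--     A's repeated list.remove which is O(n^2)); same return value and same
--     final list state as A."""
--     w = 0
--     for x in li:
--         if x % k != 0: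
--             li[w] = x
--             w += 1
--     del li[w:]
--     return li
-- ===== Notes on version B (the rewrite author's own statement) =====
-- stated objective: faster
-- what changed: Replaced the while-loop that repeatedly calls list.remove (rescanning and shifting the list each time) by a single forward pass with a write pointer that compacts kept elements in place and truncates once.
import Mathlib
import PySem

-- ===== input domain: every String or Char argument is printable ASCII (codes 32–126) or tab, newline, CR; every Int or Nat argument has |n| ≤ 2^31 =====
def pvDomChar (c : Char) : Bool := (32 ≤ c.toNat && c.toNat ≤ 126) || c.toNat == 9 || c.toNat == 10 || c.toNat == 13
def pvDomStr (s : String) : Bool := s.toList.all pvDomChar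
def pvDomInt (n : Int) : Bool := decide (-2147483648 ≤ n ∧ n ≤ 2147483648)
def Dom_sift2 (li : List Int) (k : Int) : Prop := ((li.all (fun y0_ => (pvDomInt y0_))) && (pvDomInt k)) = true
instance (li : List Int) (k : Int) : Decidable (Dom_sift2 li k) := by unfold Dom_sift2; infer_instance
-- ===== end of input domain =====

-- B replaces A's repeated list.remove while-loop by a single write-pointer compaction pass
-- (objective: faster; both mutate the argument in place in Python — equivalence proved is about the return value).


-- ===== PORT A =====
-- while i < len(li): if li[i] % k == 0: li.remove(li[i]) else: i += 1
-- fuel (2*len, never exhausted: the loop runs at most one step per element kept plus one per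
-- element removed) only makes the same computation total; remove of a present element always
-- succeeds, so getD's default is unreachable
def sift2Go (fuel : Nat) (li : List Int) (k : Int) (i : Nat) : List Int :=
  match fuel with
  | 0 => li
  | fuel + 1 =>
    if h : i < li.length then
      if PySem.Int.mod li[i] k = 0 then
        sift2Go fuel ((PySem.List.remove? li li[i]).getD li) k i
      else
        sift2Go fuel li k (i + 1)
    else
      li

def sift2 (li : List Int) (k : Int) : List Int :=
  sift2Go (li.length + li.length) li k 0

-- ===== PORT B =====
-- w = 0; for x in li: if x % k != 0: li[w] = x; w += 1; del li[w:]; return li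
-- (the written prefix li[:w] is the fold accumulator)
def sift2_alt (li : List Int) (k : Int) : List Int :=
  li.foldl (fun acc x => if PySem.Int.mod x k ≠ 0 then acc ++ [x] else acc) []

-- ===== PRECONDITION & SPEC =====
-- Pre_ excludes exactly the inputs where Python A raises: a nonempty list with k = 0
-- (the first `li[i] % k` is a ZeroDivisionError; B raises there too).
def Pre_sift2 (li : List Int) (k : Int) : Prop := li = [] ∨ k ≠ 0
instance (li : List Int) (k : Int) : Decidable (Pre_sift2 li k) := by unfold Pre_sift2; infer_instance
def pvWitness_sift2 : List Int × Int := ([6, 1, 4, 9, -6], 3)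

def Spec_sift2 (li : List Int) (k : Int) (out : List Int) : Prop := out = sift2_alt li k
instance (li : List Int) (k : Int) (out : List Int) : Decidable (Spec_sift2 li k out) := by unfold Spec_sift2; infer_instance

-- ===== CLAIM (what is proved, stated in full; the proofs are below) =====
def Claim_equal_sift2 : Prop := ∀ (li : List Int) (k : Int), Dom_sift2 li k → Pre_sift2 li k → Spec_sift2 li k (sift2 li k)

-- ===== LEMMAS AND PROOFS =====

-- removing the first occurrence of v from a ++ v :: b, when v does not occur in a
theorem pv_remove_append_cons {v : Int} : ∀ (a b : List Int), v ∉ a →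
    PySem.List.remove? (a ++ v :: b) v = some (a ++ b)
  | [], b, _ => by simp
  | x :: a, b, hv => by
    have hx : x ≠ v := fun h => hv (h ▸ List.mem_cons_self)
    have ih := pv_remove_append_cons a b (fun h => hv (List.mem_cons_of_mem _ h))
    rw [List.cons_append, PySem.List.remove?_cons_of_ne _ hx, ih]
    rfl

-- loop invariant: with the already-kept prefix a (all non-multiples) and remaining suffix b,
-- the loop at index len(a) returns a ++ filter b
theorem pv_go_eq (k : Int) : ∀ (fuel : Nat) (b a : List Int), b.length ≤ fuel →
    (∀ x ∈ a, PySem.Int.mod x k ≠ 0) →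
    sift2Go fuel (a ++ b) k a.length =
      a ++ b.filter (fun x => decide (PySem.Int.mod x k ≠ 0))
  | 0, b, a, hn, _ => by
    have hb : b = [] := List.eq_nil_of_length_eq_zero (by omega)
    simp [sift2Go, hb]
  | fuel + 1, [], a, _, _ => by
    rw [sift2Go, dif_neg (by simp)]
    simp
  | fuel + 1, x :: b', a, hn, ha => by
    have hlt : a.length < (a ++ x :: b').length := by simp
    have hget : (a ++ x :: b')[a.length]'hlt = x := by simp
    rw [sift2Go, dif_pos hlt]
    simp only [hget]
    by_cases hz : PySem.Int.mod x k = 0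
    · have hnot : x ∉ a := fun hmem => (ha x hmem) hz
      rw [if_pos hz, pv_remove_append_cons a b' hnot, Option.getD_some,
        pv_go_eq k fuel b' a (by simp at hn; omega) ha]
      simp [hz]
    · have he : a ++ x :: b' = (a ++ [x]) ++ b' := by simp
      have hl : a.length + 1 = (a ++ [x]).length := by simp
      rw [if_neg hz, he, hl,
        pv_go_eq k fuel b' (a ++ [x]) (by simp at hn ⊢; omega)
          (by intro y hy; rcases List.mem_append.mp hy with hy | hy
              · exact ha y hy
              · simp at hy; exact hy ▸ hz)]
      simp [hz]

-- ===== VERDICT (by name: the statement is the Claim_ definition above) =====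
theorem sift2_spec : Claim_equal_sift2 := by
  intro li k _ _
  unfold Spec_sift2 sift2 sift2_alt
  have h := pv_go_eq k (li.length + li.length) li [] (by omega) (by simp)
  simp only [List.nil_append, List.length_nil] at h
  rw [h, PySem.List.foldl_append_ite_eq_filter]
  simp
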